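-- pv_equiv track=rewrite | github.com/matyas095/ZM2_Mereni | utils.py | balance_math_braces
-- ===== SOURCE A (Python) =====
-- def balance_math_braces(s: str) -> str:
--     """Vyvážení { } uvnitř každého $..$ bloku."""
--     result = ""
--     i = 0
--     while i < len(s):
--         if s[i] == '$':
--             j = s.find('$', i + 1)
--             if j == -1:
--                 result += s[i:]
--                 break
--             content = s[i + 1 : j]
--             open_c = content.count('{')
--             close_c = content.count('}')
--             if open_c > close_c:
--                 content = content + '}' * (open_c - close_c)
--             elif close_c > open_c:
--                 excess = close_c - open_c
--                 while excess > 0 and content.endswith('}'):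
--                     content = content[:-1]
--                     excess -= 1
--             result += '$' + content + '$'
--             i = j + 1
--         else:
--             result += s[i]
--             i += 1
--     return result
-- ===== SOURCE B (Python) =====
-- def _balance(content: str) -> str:
--     opens = content.count('{')
--     closes = content.count('}')
--     if opens > closes:
--         return content + '}' * (opens - closes)
--     excess = closes - opens
--     while excess > 0 and content.endswith('}'):
--         content = content[:-1]
--         excess -= 1
--     return content
--
--
-- def balance_math_braces(s: str) -> str:
--     """Split on '$' and reassemble: odd segments (inside a closed $..$ pair)
--     get balanced braces; an unmatched trailing '$' segment is kept literally."""
--     parts = s.split('$')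
--     pieces = [parts[0]]
--     rest = parts[1:]
--     while len(rest) >= 2:
--         pieces.append('$' + _balance(rest[0]) + '$' + rest[1])
--         rest = rest[2:]
--     if rest:
--         pieces.append('$' + rest[0])
--     return ''.join(pieces)
-- ===== Notes on version B (the rewrite author's own statement) =====
-- stated objective: faster
-- what changed: Replaces A's char-by-char index scan with quadratic string accumulation by a single split('$') followed by a pairwise reassembly of the segment list joined once at the end, reusing one brace-balancing helper.
import Mathlib
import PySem

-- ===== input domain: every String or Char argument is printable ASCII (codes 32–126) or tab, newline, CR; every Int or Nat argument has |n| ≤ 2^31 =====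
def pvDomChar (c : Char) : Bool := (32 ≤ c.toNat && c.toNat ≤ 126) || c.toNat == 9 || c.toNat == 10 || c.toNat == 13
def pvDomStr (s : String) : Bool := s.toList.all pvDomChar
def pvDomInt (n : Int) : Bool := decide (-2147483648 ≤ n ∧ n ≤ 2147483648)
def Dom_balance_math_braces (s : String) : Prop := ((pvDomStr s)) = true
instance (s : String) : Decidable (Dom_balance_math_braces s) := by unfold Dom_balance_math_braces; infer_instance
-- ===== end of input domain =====

-- B replaces A's char-by-char index scan by one split('$') and a pairwise reassembly of the
-- segment list (same return value; neither version mutates anything).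

-- ===== PORT A =====
-- the identical Python while-loop "while excess > 0 and content.endswith('}'): content = content[:-1]; excess -= 1"
-- occurs inline in A and inside B's `_balance`; it is lambda-lifted once, to this helper.
def pvStripLoop (content : List Char) (excess : Nat) : List Char :=
  if 0 < excess ∧ PySem.Chars.endswith content ['}'] = true then
    pvStripLoop (PySem.List.slice content none (some (-1))) (excess - 1)
  else content
termination_by excess
decreasing_by omega

-- termination fact for A's loop: when s.find('$', i+1) ≠ -1 the loop resumes past i
theorem pv_find_lb (s : List Char) (i : Nat) (hi : i < s.length)
    (h : ¬ PySem.Chars.findFrom s ['$'] ((i : Int) + 1) = -1) :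
    i < (PySem.Chars.findFrom s ['$'] ((i : Int) + 1)).toNat := by
  have hk : i + 1 ≤ s.length := hi
  have heq := PySem.Chars.findFrom_natCast s ['$'] (i + 1) hk
  have hc : ((i + 1 : Nat) : Int) = (i : Int) + 1 := by push_cast; ring
  rw [hc] at heq
  rw [heq] at h ⊢
  split at h
  · exact absurd rfl h
  · have := PySem.Chars.neg_one_le_find (List.drop (i + 1) s) ['$']
    rename_i hne
    omega

-- A: while-loop over index i accumulating `result`, with s.find('$', i+1), slices and the
-- inline balance steps, exactly as in the Python.
def pvALoop (s : List Char) (result : List Char) (i : Nat) : List Char :=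
  if hi : i < s.length then
    if s[i] = '$' then
      let j := PySem.Chars.findFrom s ['$'] ((i : Int) + 1)
      if hj : j = -1 then
        result ++ PySem.List.slice s (some (i : Int)) none     -- result += s[i:]; break
      else
        let content := PySem.List.slice s (some ((i : Int) + 1)) (some j)
        let openC := PySem.Chars.count content ['{']
        let closeC := PySem.Chars.count content ['}']
        let content :=
          if openC > closeC then content ++ List.replicate (openC - closeC) '}'
          else if closeC > openC then pvStripLoop content (closeC - openC)
          else content
        pvALoop s (result ++ '$' :: (content ++ ['$'])) (j.toNat + 1)   -- i = j + 1 (j ≥ 0 here)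
    else
      pvALoop s (result ++ [s[i]]) (i + 1)
  else result
termination_by s.length - i
decreasing_by
  · have := pv_find_lb s i hi hj; omega
  · omega

def balance_math_braces (s : String) : String :=
  String.ofList (pvALoop s.toList [] 0)

-- ===== PORT B =====
def pvBalance (content : List Char) : List Char :=
  let opens := PySem.Chars.count content ['{']
  let closes := PySem.Chars.count content ['}']
  if opens > closes then content ++ List.replicate (opens - closes) '}'
  else pvStripLoop content (closes - opens)

-- B: "while len(rest) >= 2: pieces.append('$' + _balance(rest[0]) + '$' + rest[1]); rest = rest[2:]"
def pvPairsLoop (pieces rest : List (List Char)) : List (List Char) × List (List Char) :=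
  if _h : 2 ≤ rest.length then
    pvPairsLoop
      (pieces ++ ['$' :: (pvBalance (PySem.List.pyGetD rest 0 []) ++ '$' :: PySem.List.pyGetD rest 1 [])])
      (PySem.List.slice rest (some 2) none)
  else (pieces, rest)
termination_by rest.length
decreasing_by
  rw [PySem.List.slice_from rest (by omega : (0:Int) ≤ 2)]
  simp
  omega

def balance_math_braces_alt (s : String) : String :=
  let parts := PySem.Chars.splitOn s.toList ['$']
  let pieces := [PySem.List.pyGetD parts 0 []]
  let rest := PySem.List.slice parts (some 1) none
  let pr := pvPairsLoop pieces rest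
  let pieces := if pr.2 ≠ [] then pr.1 ++ ['$' :: PySem.List.pyGetD pr.2 0 []] else pr.1
  String.ofList (PySem.Chars.join [] pieces)

-- ===== PRECONDITION & SPEC =====
def Spec_balance_math_braces (s : String) (out : String) : Prop := out = balance_math_braces_alt s
instance (s : String) (out : String) : Decidable (Spec_balance_math_braces s out) := by unfold Spec_balance_math_braces; infer_instance

-- ===== CLAIM (what is proved, stated in full; the proofs are below) =====
def Claim_equal_balance_math_braces : Prop := ∀ (s : String), Dom_balance_math_braces s → Spec_balance_math_braces s (balance_math_braces s)

-- ===== LEMMAS AND PROOFS =====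

-- splitting at '$' with an accumulated current segment (= what splitOn.go computes)
def pvMySplit (pre : List Char) : List Char → List (List Char)
  | [] => [pre]
  | c :: t => if c = '$' then pre :: pvMySplit [] t else pvMySplit (pre ++ [c]) t

-- the reassembly B's pair loop performs, as a function of the segment list
def pvG : List (List Char) → List Char
  | [] => []
  | [m] => '$' :: m
  | m :: t :: r => '$' :: (pvBalance m ++ '$' :: (t ++ pvG r))

-- A's loop as a function of the remaining suffix
def pvACore : List Char → List Char
  | [] => []
  | c :: t =>
    if c = '$' then
      let f := PySem.Chars.find t ['$']
      if f = -1 then c :: t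
      else '$' :: (pvBalance (t.take f.toNat) ++ '$' :: pvACore (t.drop (f.toNat + 1)))
    else c :: pvACore t
termination_by l => l.length
decreasing_by all_goals (simp; try omega)

def pvF (l : List Char) : List Char :=
  (pvMySplit [] l).headD [] ++ pvG (pvMySplit [] l).tail

theorem pv_join_nil (x : List (List Char)) : PySem.Chars.join [] x = x.flatten := by
  have h : ∀ (y : List (List Char)), List.intercalate ([] : List Char) y = y.flatten := by
    intro y
    induction y with
    | nil => rfl
    | cons a t ih =>
      cases t with
      | nil => simp [List.intercalate]
      | cons b r =>
        have : List.intercalate ([] : List Char) (a :: b :: r) = a ++ List.intercalate [] (b :: r) := by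
          simp [List.intercalate, List.intersperse]
        rw [this, ih]; simp
  simpa [PySem.Chars.join] using h x

theorem pv_go_nil (fuel : Nat) (cur : List Char) (acc : List (List Char)) :
    PySem.Chars.splitOn.go ['$'] (fuel + 1) [] cur acc = (cur.reverse :: acc).reverse := by
  rw [PySem.Chars.splitOn.go]; omega

theorem pv_go_cons (fuel : Nat) (c : Char) (rest cur : List Char) (acc : List (List Char)) :
    PySem.Chars.splitOn.go ['$'] (fuel + 1) (c :: rest) cur acc =
      if c = '$' then PySem.Chars.splitOn.go ['$'] fuel rest [] (cur.reverse :: acc)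
      else PySem.Chars.splitOn.go ['$'] fuel rest (c :: cur) acc := by
  rw [PySem.Chars.splitOn.go]
  by_cases h : c = '$'
  · simp [h, List.isPrefixOf]
  · have hp : (['$'].isPrefixOf (c :: rest)) = false := by
      simp [List.isPrefixOf]; exact fun hh => absurd hh.symm h
    simp [hp, h]

theorem pv_go_spec (fuel : Nat) : ∀ (l cur : List Char) (acc : List (List Char)),
    l.length < fuel →
    PySem.Chars.splitOn.go ['$'] fuel l cur acc = acc.reverse ++ pvMySplit cur.reverse l := by
  induction fuel with
  | zero => intro l cur acc h; omega
  | succ n ih =>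
    intro l cur acc h
    cases l with
    | nil => rw [pv_go_nil]; simp [pvMySplit]
    | cons c t =>
      rw [pv_go_cons]
      by_cases hc : c = '$'
      · simp only [hc]
        rw [ih t [] _ (by simpa using h)]
        simp [pvMySplit]
      · rw [if_neg hc, ih t (c :: cur) _ (by simpa using h)]
        simp [pvMySplit, hc]

theorem pv_splitOn_eq (l : List Char) : PySem.Chars.splitOn l ['$'] = pvMySplit [] l := by
  have := pv_go_spec (l.length + 1) l [] [] (by omega)
  simpa [PySem.Chars.splitOn] using this

theorem pv_mySplit_acc (l : List Char) : ∀ pre, pvMySplit pre l = (pvMySplit [] l).modifyHead (pre ++ ·) := by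
  induction l with
  | nil => intro pre; simp [pvMySplit]
  | cons c t ih =>
    intro pre
    by_cases hc : c = '$'
    · simp [pvMySplit, hc]
    · simp only [pvMySplit, if_neg hc, List.nil_append]
      rw [ih (pre ++ [c]), ih [c]]
      cases h : pvMySplit [] t <;> simp

theorem pv_mySplit_ne_nil (l : List Char) : ∀ pre, pvMySplit pre l ≠ [] := by
  induction l with
  | nil => intro pre; simp [pvMySplit]
  | cons c t ih =>
    intro pre
    by_cases hc : c = '$'
    · simp [pvMySplit, hc]
    · simp only [pvMySplit, if_neg hc]
      exact ih _

theorem pv_mySplit_no_dollar (l : List Char) (h : '$' ∉ l) : ∀ pre, pvMySplit pre l = [pre ++ l] := by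
  induction l with
  | nil => intro pre; simp [pvMySplit]
  | cons c t ih =>
    intro pre
    have hc : c ≠ '$' := fun hh => h (hh ▸ List.mem_cons_self)
    simp only [pvMySplit, if_neg hc]
    rw [ih (fun hm => h (List.mem_cons_of_mem _ hm))]
    simp

theorem pv_mySplit_split (a : List Char) (h : '$' ∉ a) (r : List Char) :
    ∀ pre, pvMySplit pre (a ++ '$' :: r) = (pre ++ a) :: pvMySplit [] r := by
  induction a with
  | nil => intro pre; simp [pvMySplit]
  | cons c t ih =>
    intro pre
    have hc : c ≠ '$' := fun hh => h (hh ▸ List.mem_cons_self)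
    simp only [List.cons_append, pvMySplit, if_neg hc]
    rw [ih (fun hm => h (List.mem_cons_of_mem _ hm))]
    simp

theorem pv_F_cons_ne (c : Char) (t : List Char) (hc : c ≠ '$') : pvF (c :: t) = c :: pvF t := by
  unfold pvF
  have h1 : pvMySplit [] (c :: t) = pvMySplit [c] t := by simp [pvMySplit, hc]
  rw [h1, pv_mySplit_acc t [c]]
  cases hpt : pvMySplit [] t with
  | nil => exact absurd hpt (pv_mySplit_ne_nil _ _)
  | cons p0 ps => simp

-- ACore = F (the split-based form); strong induction on length
theorem pv_acore_aux : ∀ (n : Nat) (l : List Char), l.length ≤ n → pvACore l = pvF l := by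
  intro n
  induction n with
  | zero =>
    intro l h
    have : l = [] := by cases l <;> simp_all
    subst this
    simp [pvACore, pvF, pvMySplit, pvG]
  | succ n ih =>
    intro l h
    cases l with
    | nil => simp [pvACore, pvF, pvMySplit, pvG]
    | cons c t =>
      by_cases hc : c = '$'
      · subst hc
        by_cases hf : PySem.Chars.find t ['$'] = -1
        · have hnot : '$' ∉ t := by
            intro hm
            obtain ⟨u, w, huw⟩ := List.append_of_mem hm
            exact (PySem.Chars.find_eq_neg_one_iff t ['$']).mp hf ⟨u, w, by simp [huw]⟩
          rw [pvACore]
          simp only [hf]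
          unfold pvF
          have h1 : pvMySplit [] ('$' :: t) = [] :: pvMySplit [] t := by simp [pvMySplit]
          rw [h1, pv_mySplit_no_dollar t hnot []]
          simp [pvG]
        · have h0 : 0 ≤ PySem.Chars.find t ['$'] := by
            have := PySem.Chars.neg_one_le_find t ['$']
            rcases lt_or_eq_of_le this with h' | h'
            · omega
            · exact absurd h'.symm hf
          obtain ⟨hpre, hmin⟩ := PySem.Chars.find_spec h0
          obtain ⟨v, hv⟩ := hpre
          have hlenv := congrArg List.length hv
          simp at hlenv
          have hk : (PySem.Chars.find t ['$']).toNat < t.length := by omega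
          set k := (PySem.Chars.find t ['$']).toNat with hkdef
          have htk : t = t.take k ++ '$' :: v := by
            conv_lhs => rw [← List.take_append_drop k t]
            rw [← hv]
            rfl
          have hnotin : '$' ∉ t.take k := by
            intro hm
            obtain ⟨u, w, huw⟩ := List.append_of_mem hm
            have hlu := congrArg List.length huw
            simp at hlu
            have hu : u.length < k := by omega
            apply hmin u.length hu
            have hdropu : t.drop u.length = '$' :: (w ++ t.drop k) := by
              conv_lhs => rw [← List.take_append_drop k t, huw]
              rw [show (u ++ '$' :: w) ++ t.drop k = u ++ ('$' :: (w ++ t.drop k)) by simp]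
              exact List.drop_left
            exact ⟨w ++ t.drop k, by rw [hdropu]; rfl⟩
          have hdrop : t.drop (k + 1) = v := by
            have h' : t.drop (k + 1) = (t.drop k).drop 1 := by rw [List.drop_drop]
            rw [h', ← hv]
            rfl
          have hsplit : pvMySplit [] t = t.take k :: pvMySplit [] v := by
            conv_lhs => rw [htk]
            rw [pv_mySplit_split (t.take k) hnotin v []]
            simp
          cases hpv : pvMySplit [] v with
          | nil => exact absurd hpv (pv_mySplit_ne_nil _ _)
          | cons p0 ps =>
            have hIH : pvACore v = p0 ++ pvG ps := by
              rw [ih v (by simp at h; omega)]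
              unfold pvF
              rw [hpv]
              simp
            rw [pvACore]
            simp only [hf]
            unfold pvF
            have h1 : pvMySplit [] ('$' :: t) = [] :: pvMySplit [] t := by simp [pvMySplit]
            rw [h1, hsplit, hpv]
            simp only [pvG, List.nil_append, List.headD_cons, List.tail_cons]
            rw [← hkdef, hdrop, hIH]
            simp
      · rw [pvACore]
        simp only [if_neg hc]
        rw [ih t (by simp at h; omega), pv_F_cons_ne c t hc]

theorem pv_acore_eq_F (l : List Char) : pvACore l = pvF l :=
  pv_acore_aux l.length l (le_refl _)

theorem pv_bal_inline (x : List Char) :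
    (if PySem.Chars.count x ['{'] > PySem.Chars.count x ['}'] then
      x ++ List.replicate (PySem.Chars.count x ['{'] - PySem.Chars.count x ['}']) '}'
     else if PySem.Chars.count x ['}'] > PySem.Chars.count x ['{'] then
      pvStripLoop x (PySem.Chars.count x ['}'] - PySem.Chars.count x ['{'])
     else x) = pvBalance x := by
  unfold pvBalance
  by_cases h1 : PySem.Chars.count x ['{'] > PySem.Chars.count x ['}']
  · simp [h1]
  · by_cases h2 : PySem.Chars.count x ['}'] > PySem.Chars.count x ['{']
    · simp [h1, h2]
    · have hz : PySem.Chars.count x ['}'] - PySem.Chars.count x ['{'] = 0 := by omega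
      rw [if_neg h1, if_neg h2, if_neg h1, hz, pvStripLoop]
      simp

-- A's loop equals ACore on the suffix
theorem pv_aloop_aux : ∀ (n : Nat) (s : List Char) (i : Nat) (res : List Char),
    s.length - i ≤ n → pvALoop s res i = res ++ pvACore (s.drop i) := by
  intro n
  induction n with
  | zero =>
    intro s i res h
    rw [pvALoop, dif_neg (by omega)]
    rw [List.drop_eq_nil_of_le (by omega), pvACore]
    simp
  | succ n ih =>
    intro s i res h
    by_cases hi : i < s.length
    · rw [pvALoop, dif_pos hi]
      have hdi : s.drop i = s[i] :: s.drop (i + 1) := List.drop_eq_getElem_cons hi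
      by_cases hdq : s[i] = '$'
      · rw [if_pos hdq]
        have hfind : PySem.Chars.findFrom s ['$'] ((i : Int) + 1) =
            if PySem.Chars.find (s.drop (i + 1)) ['$'] = -1 then -1
            else ((i : Int) + 1) + PySem.Chars.find (s.drop (i + 1)) ['$'] := by
          have hh := PySem.Chars.findFrom_natCast s ['$'] (i + 1) (by omega)
          rw [show ((i + 1 : Nat) : Int) = (i : Int) + 1 by push_cast; ring] at hh
          exact hh
        by_cases hf : PySem.Chars.find (s.drop (i + 1)) ['$'] = -1
        · rw [hfind, if_pos hf, dif_pos rfl]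
          rw [PySem.List.slice_from s (by omega : (0:Int) ≤ (i : Int))]
          rw [Int.toNat_natCast]
          rw [hdi, pvACore]
          simp [hdq, hf]
        · have hf0 : 0 ≤ PySem.Chars.find (s.drop (i + 1)) ['$'] := by
            have := PySem.Chars.neg_one_le_find (s.drop (i + 1)) ['$']
            rcases lt_or_eq_of_le this with h' | h'
            · omega
            · exact absurd h'.symm hf
          obtain ⟨hpre, -⟩ := PySem.Chars.find_spec hf0
          obtain ⟨v, hv⟩ := hpre
          have hlenv := congrArg List.length hv
          simp at hlenv
          have hklt : (PySem.Chars.find (s.drop (i + 1)) ['$']).toNat < s.length - (i + 1) := by omega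
          rw [hfind, if_neg hf, dif_neg (by omega)]
          have hcont : PySem.List.slice s (some ((i : Int) + 1)) (some ((i : Int) + 1 + PySem.Chars.find (s.drop (i + 1)) ['$'])) =
              (s.drop (i + 1)).take (PySem.Chars.find (s.drop (i + 1)) ['$']).toNat := by
            rw [PySem.List.slice_toNat s (by omega) (by omega)]
            congr 1
            omega
          rw [hcont]
          simp only []
          rw [pv_bal_inline]
          have hjn : ((i : Int) + 1 + PySem.Chars.find (s.drop (i + 1)) ['$']).toNat + 1 =
              i + 1 + ((PySem.Chars.find (s.drop (i + 1)) ['$']).toNat + 1) := by omega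
          rw [hjn, ih s _ _ (by omega)]
          rw [show i + 1 + ((PySem.Chars.find (s.drop (i + 1)) ['$']).toNat + 1) =
              (i + 1) + ((PySem.Chars.find (s.drop (i + 1)) ['$']).toNat + 1) from rfl,
            ← List.drop_drop]
          rw [hdi, pvACore]
          simp [hdq, hf]
      · rw [if_neg hdq]
        rw [ih s (i + 1) (res ++ [s[i]]) (by omega)]
        rw [hdi, pvACore]
        simp [hdq]
    · rw [pvALoop, dif_neg hi]
      rw [List.drop_eq_nil_of_le (by omega), pvACore]
      simp

theorem pv_aloop_eq (s : List Char) : ∀ (i : Nat) (res : List Char), i ≤ s.length →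
    pvALoop s res i = res ++ pvACore (s.drop i) := by
  intro i res _
  exact pv_aloop_aux (s.length - i) s i res (le_refl _)

-- B's pair loop + join
theorem pv_pairs_join (rest : List (List Char)) : ∀ (pieces : List (List Char)),
    PySem.Chars.join []
      (if (pvPairsLoop pieces rest).2 ≠ [] then
        (pvPairsLoop pieces rest).1 ++ ['$' :: PySem.List.pyGetD (pvPairsLoop pieces rest).2 0 []]
       else (pvPairsLoop pieces rest).1)
      = PySem.Chars.join [] pieces ++ pvG rest := by
  induction rest using pvG.induct with
  | case1 =>
    intro pieces
    rw [pvPairsLoop]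
    simp [pvG]
  | case2 m =>
    intro pieces
    rw [pvPairsLoop]
    simp only [List.length_cons, List.length_nil]
    rw [dif_neg (by omega)]
    simp [pvG, pv_join_nil, PySem.List.pyGetD_zero_cons]
  | case3 m t r ih =>
    intro pieces
    rw [pvPairsLoop]
    rw [dif_pos (by simp)]
    have h2 : PySem.List.slice (m::t::r) (some 2) none = r := by
      rw [PySem.List.slice_from _ (by omega : (0:Int) ≤ 2)]; rfl
    have h0 : PySem.List.pyGetD (m::t::r) 0 ([]:List Char) = m := by simp [pysem]
    have h1 : PySem.List.pyGetD (m::t::r) 1 ([]:List Char) = t := by simp [pysem]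
    rw [h2, h0, h1, ih]
    simp [pvG, pv_join_nil]

theorem pv_alt_eq (s : String) : balance_math_braces_alt s = String.ofList (pvF s.toList) := by
  unfold balance_math_braces_alt
  rw [pv_splitOn_eq]
  cases hp : pvMySplit [] s.toList with
  | nil => exact absurd hp (pv_mySplit_ne_nil _ _)
  | cons p ps =>
    have h0 : PySem.List.pyGetD (p :: ps) 0 ([]:List Char) = p := by simp [pysem]
    have h1 : PySem.List.slice (p :: ps) (some 1) none = ps := by
      rw [PySem.List.slice_from_one]; rfl
    simp only [h0, h1]
    rw [pv_pairs_join ps [p]]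
    unfold pvF
    rw [hp]
    congr 1
    simp [PySem.Chars.join, List.intercalate]

-- ===== VERDICT (by name: the statement is the Claim_ definition above) =====
theorem balance_math_braces_spec : Claim_equal_balance_math_braces := by
  intro s _
  unfold Spec_balance_math_braces
  have h1 : balance_math_braces s = String.ofList (pvF s.toList) := by
    unfold balance_math_braces
    rw [pv_aloop_eq s.toList 0 [] (by omega)]
    simp [pv_acore_eq_F]
  have h2 : balance_math_braces_alt s = String.ofList (pvF s.toList) := pv_alt_eq s
  rw [h1, h2]
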